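-- pv_equiv track=rewrite | github.com/Songtuan-Lin/fuzzer | util.py | find_all_tuples
-- ===== SOURCE A (Python) =====
-- def find_all_tuples(all_combs):
--     if len(all_combs) == 0:
--         return [tuple()]
--     results = set()
--     tail = all_combs.pop(-1)
--     heads = find_all_tuples(all_combs)
--     for e in tail:
--         for t in heads:
--             t= list(t)
--             t.append(e)
--             results.add(tuple(t))
--     return results
-- ===== SOURCE B (Python) =====
-- def find_all_tuples(all_combs):
--     if len(all_combs) == 0:
--         return [tuple()]
--     results = {()}
--     while all_combs:
--         group = all_combs.pop(0)
--         results = {t + (e,) for e in group for t in results}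
--     return results
-- ===== Notes on version B (the rewrite author's own statement) =====
-- stated objective: alternative
-- what changed: B replaces A's recursion that pops the last group and fills a set with an explicit double add-loop by an iterative while-loop that pops the first group and rebuilds the partial-product set with a set comprehension per level.
import Mathlib
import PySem

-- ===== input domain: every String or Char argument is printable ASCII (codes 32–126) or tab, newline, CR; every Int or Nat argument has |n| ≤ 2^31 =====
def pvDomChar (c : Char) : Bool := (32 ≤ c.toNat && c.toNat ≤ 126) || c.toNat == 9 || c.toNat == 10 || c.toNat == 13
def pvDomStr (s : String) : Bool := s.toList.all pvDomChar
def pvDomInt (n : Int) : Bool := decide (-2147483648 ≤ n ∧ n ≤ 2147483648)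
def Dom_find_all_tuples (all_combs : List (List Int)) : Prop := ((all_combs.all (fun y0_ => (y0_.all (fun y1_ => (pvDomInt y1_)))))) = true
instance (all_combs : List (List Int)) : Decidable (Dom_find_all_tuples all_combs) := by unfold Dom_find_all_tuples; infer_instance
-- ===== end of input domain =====

-- B replaces A's recursion that pops the LAST group and runs an explicit double add-loop by an
-- iterative while-loop popping the FIRST group with a set comprehension per level (objective:
-- alternative); equivalence is about the RETURN value only (both A and B empty the argument list
-- in place).

-- ===== PORT A =====
-- A: recursion popping the last group, then a double loop adding extended tuples into a set.
def find_all_tuples (all_combs : List (List Int)) : List (List Int) :=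
  if h : all_combs.length = 0 then [[]]
  else
    let tail := all_combs.getLast (by cases all_combs <;> simp_all)
    let heads := find_all_tuples all_combs.dropLast
    tail.foldl (fun results e =>
      heads.foldl (fun results t => PySem.Set.add results (t ++ [e])) results)
      PySem.Set.empty
termination_by all_combs.length
decreasing_by simp only [List.length_dropLast]; omega

-- ===== PORT B =====
-- B: `results = {()}`, then `while all_combs:` pop the FIRST group and rebuild
-- `results = {t + (e,) for e in group for t in results}` (a set comprehension, e outer, t inner).
def find_all_tuples_alt (all_combs : List (List Int)) : List (List Int) :=
  if all_combs.length = 0 then [[]]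
  else
    all_combs.foldl
      (fun results group =>
        PySem.Set.ofList (group.flatMap (fun e => results.map (fun t => t ++ [e])))) [[]]

-- ===== PRECONDITION & SPEC =====
def Spec_find_all_tuples (all_combs : List (List Int)) (out : List (List Int)) : Prop := out = find_all_tuples_alt all_combs
instance (all_combs : List (List Int)) (out : List (List Int)) : Decidable (Spec_find_all_tuples all_combs out) := by unfold Spec_find_all_tuples; infer_instance

-- ===== CLAIM (what is proved, stated in full; the proofs are below) =====
def Claim_equal_find_all_tuples : Prop := ∀ (all_combs : List (List Int)), Dom_find_all_tuples all_combs → Spec_find_all_tuples all_combs (find_all_tuples all_combs)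

-- ===== LEMMAS AND PROOFS =====

-- A's double add-loop over one group is one Set.update with the flattened block list.
theorem loopA_eq_update (g : List Int) (heads : List (List Int)) (r : List (List Int)) :
    g.foldl (fun results e =>
        heads.foldl (fun results t => PySem.Set.add results (t ++ [e])) results) r
      = PySem.Set.update r (g.flatMap (fun e => heads.map (fun t => t ++ [e]))) := by
  induction g generalizing r with
  | nil => simp [PySem.Set.update]
  | cons e g ih =>
      simp only [List.foldl_cons, List.flatMap_cons, PySem.Set.update_append, ih]
      rw [← PySem.Set.update_map_eq_foldl_add]

-- the invariant: A's right-peeling recursion computes B's left fold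
theorem find_all_tuples_eq_fold (xs : List (List Int)) :
    find_all_tuples xs
      = xs.foldl
          (fun results group =>
            PySem.Set.ofList (group.flatMap (fun e => results.map (fun t => t ++ [e])))) [[]] := by
  induction xs using List.reverseRecOn with
  | nil => rw [find_all_tuples]; rfl
  | append_singleton ys g ih =>
      rw [find_all_tuples]
      simp only [List.getLast_append, List.dropLast_concat, List.foldl_append,
        List.foldl_cons, List.foldl_nil]
      rw [dif_neg (by simp), loopA_eq_update, ih]
      rfl

-- ===== VERDICT (by name: the statement is the Claim_ definition above) =====
theorem find_all_tuples_spec : Claim_equal_find_all_tuples := by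
  intro xs _
  unfold Spec_find_all_tuples find_all_tuples_alt
  by_cases h : xs.length = 0
  · rw [if_pos h, find_all_tuples, dif_pos h]
  · rw [if_neg h, find_all_tuples_eq_fold]
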